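-- pv_equiv track=rewrite | github.com/EdwardG5/Project85 | Edward/compresssion.py | createInfo
-- ===== SOURCE A (Python) =====
-- from collections import Counter
--
-- def consensus(data):
--     consensus = ""
--     for i in range(len(data[0])):
--         characters = list(map(lambda x: x[i], data))
--         c = Counter(characters)
--         mode = c.most_common(1)[0][0]
--         consensus += mode
--     return consensus
--
-- def createInfo(data):
--     cS = consensus(data)
--     info = []
--     for i in range(len(cS)):
--         c = cS[i]
--         disagrees = {}
--         for x in range(len(data)):
--             if data[x][i] != c:
--                 if data[x][i] in disagrees:
--                     disagrees[data[x][i]].append(x)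
--                 else:
--                     disagrees[data[x][i]] = [x]
--         errors = []
--         for k, v in disagrees.items():
--             errors.append( (k, len(v), v ) )
--         info.append( (c, len(errors), errors) )
--     return info
-- ===== SOURCE B (Python) =====
-- def createInfo(data):
--     # single per-column pass: one ordered dict of char -> row indices per column;
--     # consensus char = key with the largest group (first-inserted wins ties, like most_common)
--     info = []
--     for i in range(len(data[0])):
--         groups = {}
--         for x in range(len(data)):
--             groups.setdefault(data[x][i], []).append(x)
--         mode = max(groups, key=lambda k: len(groups[k]))
--         errors = [(k, len(v), v) for k, v in groups.items() if k != mode]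
--         info.append((mode, len(errors), errors))
--     return info
-- ===== Notes on version B (the rewrite author's own statement) =====
-- stated objective: simpler
-- what changed: Replaces A's two separate passes per column (a Counter-based consensus built for the whole string first, then a second scan collecting only the disagreeing rows into a dict) by one pass per column that groups all row indices by character in a single ordered dict, reads the consensus off as the key with the largest group and the disagreement records as all other entries of the same dict.
import Mathlib
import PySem

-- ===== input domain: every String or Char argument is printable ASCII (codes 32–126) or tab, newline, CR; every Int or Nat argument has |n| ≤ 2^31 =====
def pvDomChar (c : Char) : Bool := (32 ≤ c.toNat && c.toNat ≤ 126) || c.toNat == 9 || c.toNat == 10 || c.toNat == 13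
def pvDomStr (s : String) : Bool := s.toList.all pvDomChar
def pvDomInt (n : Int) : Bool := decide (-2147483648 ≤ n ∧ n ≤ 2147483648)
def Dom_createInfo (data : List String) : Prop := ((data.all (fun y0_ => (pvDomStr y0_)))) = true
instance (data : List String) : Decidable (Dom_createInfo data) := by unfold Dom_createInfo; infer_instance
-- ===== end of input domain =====

-- B collapses A's two passes per column (Counter-based consensus over the whole string, then a
-- second disagreement scan) into one grouping pass per column; same asymptotic cost, simpler shape.

-- ===== PORT A =====
-- shared rendering of the Python 1-character string s[i] (both Pythons do data[x][i]);
-- "" is the out-of-range (IndexError) marker, excluded by Pre_createInfo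
def charAt1 (s : String) (i : Nat) : String :=
  match s.toList[i]? with
  | some c => String.ofList [c]
  | none => ""

-- consensus(data): per column, Counter + most_common(1) (a stable descending sort by count);
-- data[0] on empty data raises IndexError (excluded by Pre_), rendered here by headD ""
def consensus (data : List String) : String :=
  (List.range ((data.headD "").toList.length)).foldl (fun cons i =>
    let characters := data.map (fun x => charAt1 x i)
    let c := PySem.Dict.counter characters
    let mode := ((PySem.List.sorted c.items (fun p => p.2) true).headD ("", 0)).1
    cons ++ mode) ""

def createInfo (data : List String) : List (String × Int × (List (String × Int × List Int))) :=
  let cS := consensus data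
  (List.range cS.toList.length).foldl (fun info i =>
    let c := charAt1 cS i
    let disagrees := (PySem.List.enumerate data).foldl (fun dgs p =>
      let ch := charAt1 p.2 i
      if ch != c then
        (if dgs.contains ch then dgs.modify ch [] (· ++ [p.1]) else dgs.insert ch [p.1])
      else dgs) PySem.Dict.empty
    let errors := disagrees.items.foldl (fun errs p => errs ++ [(p.1, (p.2.length : Int), p.2)]) []
    info ++ [(c, (errors.length : Int), errors)]) []

-- ===== PORT B =====
def createInfo_alt (data : List String) : List (String × Int × (List (String × Int × List Int))) :=
  (List.range ((data.headD "").toList.length)).foldl (fun info i =>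
    let groups := (PySem.List.enumerate data).foldl (fun d p =>
      d.modify (charAt1 p.2 i) [] (· ++ [p.1])) PySem.Dict.empty
    let mode := (PySem.List.max? groups.keys (fun k => (groups.getD k []).length)).getD ""
    let errors := (groups.items.filter (fun p => p.1 != mode)).map
      (fun p => (p.1, (p.2.length : Int), p.2))
    info ++ [(mode, (errors.length : Int), errors)]) []

-- ===== PRECONDITION & SPEC =====
-- Pre_ excludes exactly the inputs on which the Python A raises IndexError: empty data
-- (data[0]) and rows shorter than the first row (data[x][i] out of range).
def Pre_createInfo (data : List String) : Prop :=
  data ≠ [] ∧ ∀ s ∈ data, (data.headD "").toList.length ≤ s.toList.length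
instance (data : List String) : Decidable (Pre_createInfo data) := by unfold Pre_createInfo; infer_instance

def pvWitness_createInfo : List String := ["abc", "abd", "xbd"]

def Spec_createInfo (data : List String) (out : List (String × Int × (List (String × Int × List Int)))) : Prop := out = createInfo_alt data
instance (data : List String) (out : List (String × Int × (List (String × Int × List Int)))) : Decidable (Spec_createInfo data out) := by unfold Spec_createInfo; infer_instance

-- ===== CLAIM (what is proved, stated in full; the proofs are below) =====
def Claim_equal_createInfo : Prop := ∀ (data : List String), Dom_createInfo data → Pre_createInfo data → Spec_createInfo data (createInfo data)

-- ===== LEMMAS AND PROOFS =====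


-- ===== VERDICT helper definitions and lemmas =====

-- the column of 1-character strings data[x][i], x in row order
def colStrs (data : List String) (i : Nat) : List String := data.map (fun s => charAt1 s i)

-- A's consensus character for one column (fst of the head of the stable descending sort)
def modeStr (data : List String) (i : Nat) : String :=
  ((PySem.List.sorted (PySem.Dict.counter (colStrs data i)).items (fun p => p.2) true).headD ("", 0)).1

-- B's per-column group dict
def groupDict (data : List String) (i : Nat) : PySem.Dict String (List Int) :=
  (PySem.List.enumerate data).foldl (fun d p =>
    d.modify (charAt1 p.2 i) [] (· ++ [p.1])) PySem.Dict.empty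

-- ---- max? as a plain running-max fold ----

lemma foldl_opt_max {α κ : Type} [LT κ] [DecidableLT κ] (key : α → κ) :
    ∀ (l : List α) (m : α),
      l.foldl (fun acc x => match acc with
        | none => some x
        | some m => if key m < key x then some x else some m) (some m)
      = some (l.foldl (fun m y => if key m < key y then y else m) m) := by
  intro l
  induction l with
  | nil => intro m; rfl
  | cons y t ih =>
    intro m
    simp only [List.foldl_cons]
    by_cases h : key m < key y
    · simp [h, ih]
    · simp [h, ih]

lemma max?_cons {α κ : Type} [LT κ] [DecidableLT κ] (key : α → κ) (x : α) (l : List α) :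
    PySem.List.max? (x :: l) key = some (l.foldl (fun m y => if key m < key y then y else m) x) := by
  unfold PySem.List.max?
  simp only [List.foldl_cons]
  exact foldl_opt_max key l x

-- ---- head of the stable reverse sort is the running max ----

lemma insertBy_ne_nil {α : Type} (bf : α → α → Bool) (x : α) (acc : List α) :
    PySem.List.insertBy bf x acc ≠ [] := by
  cases acc with
  | nil => simp [PySem.List.insertBy]
  | cons y ys =>
    simp only [PySem.List.insertBy]
    split <;> simp

lemma headD_insertBy {α κ : Type} [LT κ] [DecidableLT κ] (key : α → κ) (x d : α)
    (acc : List α) (hacc : acc ≠ []) :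
    (PySem.List.insertBy (fun a b => decide (key b < key a)) x acc).headD d
      = if key (acc.headD d) < key x then x else acc.headD d := by
  cases acc with
  | nil => exact absurd rfl hacc
  | cons y ys =>
    simp only [PySem.List.insertBy, List.headD_cons]
    by_cases h : key y < key x
    · simp [h]
    · simp [h]

lemma headD_foldl_insertBy {α κ : Type} [LT κ] [DecidableLT κ] (key : α → κ) (d : α) :
    ∀ (l : List α) (acc : List α), acc ≠ [] →
      (l.foldl (fun a x => PySem.List.insertBy (fun a b => decide (key b < key a)) x a) acc).headD d
        = l.foldl (fun m y => if key m < key y then y else m) (acc.headD d) := by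
  intro l
  induction l with
  | nil => intro acc h; rfl
  | cons y t ih =>
    intro acc h
    simp only [List.foldl_cons]
    rw [ih _ (insertBy_ne_nil _ _ _), headD_insertBy key y d acc h]

lemma headD_sorted_rev {α κ : Type} [LT κ] [DecidableLT κ] (key : α → κ) (d : α)
    (l : List α) (h : l ≠ []) :
    (PySem.List.sorted l key true).headD d = (PySem.List.max? l key).getD d := by
  cases l with
  | nil => exact absurd rfl h
  | cons x t =>
    rw [max?_cons]
    unfold PySem.List.sorted
    simp only [if_true, List.foldl_cons]
    have h1 : PySem.List.insertBy (fun a b => decide (key b < key a)) x ([] : List α) = [x] := rfl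
    rw [h1, headD_foldl_insertBy key d t [x] (by simp)]
    rfl

-- ---- max? through a map, and key congruence ----

lemma max?_map {α β κ : Type} [LT κ] [DecidableLT κ] (g : α → β) (key : β → κ) (l : List α) :
    PySem.List.max? (l.map g) key = (PySem.List.max? l (fun a => key (g a))).map g := by
  cases l with
  | nil => rfl
  | cons x t =>
    rw [List.map_cons, max?_cons, max?_cons]
    simp only [Option.map_some]
    congr 1
    induction t generalizing x with
    | nil => rfl
    | cons y s ih =>
      simp only [List.map_cons, List.foldl_cons]
      by_cases h : key (g x) < key (g y)
      · simp [h, ih]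
      · simp [h, ih]

lemma foldl_max_congr {α κ : Type} [LT κ] [DecidableLT κ] (k1 k2 : α → κ) :
    ∀ (t : List α) (x : α), k1 x = k2 x → (∀ z ∈ t, k1 z = k2 z) →
      t.foldl (fun m y => if k1 m < k1 y then y else m) x
        = t.foldl (fun m y => if k2 m < k2 y then y else m) x := by
  intro t
  induction t with
  | nil => intro x _ _; rfl
  | cons y s ih =>
    intro x hx ht
    have hy : k1 y = k2 y := ht y (by simp)
    have hs : ∀ z ∈ s, k1 z = k2 z := fun z hz => ht z (by simp [hz])
    simp only [List.foldl_cons]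
    by_cases h : k1 x < k1 y
    · rw [if_pos h, if_pos (by rw [← hx, ← hy]; exact h)]
      exact ih y hy hs
    · rw [if_neg h, if_neg (by rw [← hx, ← hy]; exact h)]
      exact ih x hx hs

lemma max?_key_congr {α κ : Type} [LT κ] [DecidableLT κ] (k1 k2 : α → κ) (l : List α)
    (h : ∀ x ∈ l, k1 x = k2 x) :
    PySem.List.max? l k1 = PySem.List.max? l k2 := by
  cases l with
  | nil => rfl
  | cons x t =>
    rw [max?_cons, max?_cons]
    congr 1
    exact foldl_max_congr k1 k2 t x (h x (by simp)) (fun z hz => h z (by simp [hz]))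

lemma max?_natCast_key {α : Type} (f : α → Nat) (l : List α) :
    PySem.List.max? l (fun a => (f a : Int)) = PySem.List.max? l f := by
  unfold PySem.List.max?
  congr 1
  funext acc x
  cases acc with
  | none => rfl
  | some m => simp

-- ---- A's mode = first key of maximal count ----

lemma modeStr_eq_max? (data : List String) (i : Nat) (hne : data ≠ []) :
    modeStr data i
      = (PySem.List.max? (PySem.Set.ofList (colStrs data i)) (fun k => (colStrs data i).count k)).getD "" := by
  have hcol : colStrs data i ≠ [] := by
    simp [colStrs]; exact hne
  have hS : PySem.Set.ofList (colStrs data i) ≠ [] := by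
    cases hc : colStrs data i with
    | nil => exact absurd hc hcol
    | cons a t => simp [PySem.Set.ofList_cons]
  have hitems : (PySem.Dict.counter (colStrs data i)).items ≠ [] := by
    rw [PySem.Dict.items_counter]
    simp only [ne_eq, List.map_eq_nil_iff]
    exact hS
  unfold modeStr
  rw [headD_sorted_rev _ _ _ hitems, PySem.Dict.items_counter,
    max?_map (fun k => (k, ((colStrs data i).count k : Int))) (fun p => p.2)]
  rw [max?_natCast_key]
  cases hm : PySem.List.max? (PySem.Set.ofList (colStrs data i)) (fun k => (colStrs data i).count k) with
  | none => rw [PySem.List.max?_eq_none_iff] at hm; exact absurd hm hS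
  | some m => rfl

-- ---- the group dict: keys and group sizes ----

lemma groupDict_eq_std (data : List String) (i : Nat) :
    groupDict data i
      = ((PySem.List.enumerate data).map (fun p => (charAt1 p.2 i, p.1))).foldl
          (fun d q => d.modify q.1 [] (· ++ [q.2])) PySem.Dict.empty := by
  rw [List.foldl_map]
  rfl

lemma map_fst_pairs (data : List String) (i : Nat) :
    ((PySem.List.enumerate data).map (fun p => (charAt1 p.2 i, p.1))).map (fun q => q.1)
      = colStrs data i := by
  rw [List.map_map]
  have : ((fun q : String × Int => q.1) ∘ fun p : Int × String => (charAt1 p.2 i, p.1))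
      = (fun s => charAt1 s i) ∘ (fun p : Int × String => p.2) := rfl
  rw [this, ← List.map_map, PySem.List.map_snd_enumerate]
  rfl

lemma groupDict_keys (data : List String) (i : Nat) :
    (groupDict data i).keys = PySem.Set.ofList (colStrs data i) := by
  unfold groupDict
  rw [PySem.Dict.keys_foldl_modify_key (PySem.List.enumerate data)
    (fun p => charAt1 p.2 i) [] (fun _ p => (· ++ [p.1]))]
  have : (PySem.List.enumerate data).map (fun p => charAt1 p.2 i) = colStrs data i := by
    have h2 := map_fst_pairs data i
    rwa [List.map_map] at h2
  rw [this]
  simp [PySem.Dict.keys_empty, PySem.Set.update_nil_left]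

lemma length_filter_fst_eq (k : String) :
    ∀ (l : List (String × Int)),
      (l.filter (fun p => p.1 == k)).length = (l.map (fun p => p.1)).count k := by
  intro l
  induction l with
  | nil => rfl
  | cons p t ih =>
    by_cases h : p.1 == k
    · simp [List.count_cons, h, ih]
    · simp [List.count_cons, h, ih]

lemma groupDict_getD_len (data : List String) (i : Nat) (k : String) :
    ((groupDict data i).getD k []).length = (colStrs data i).count k := by
  rw [groupDict_eq_std, PySem.Dict.getD_foldl_modify_append]
  simp only [PySem.Dict.getD_empty, List.nil_append, List.length_map]
  rw [length_filter_fst_eq, map_fst_pairs data i]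

-- ---- the disagreement dict items are the filtered group-dict items ----

lemma contains_if_modify (d : PySem.Dict String (List Int)) (k : String) (v : Int) :
    (if d.contains k then d.modify k [] (· ++ [v]) else d.insert k [v])
      = d.modify k [] (· ++ [v]) := by
  by_cases h : d.contains k = true
  · rw [if_pos h]
  · rw [if_neg h, PySem.Dict.modify,
      PySem.Dict.getD_of_not_contains _ _ (Bool.not_eq_true _ ▸ h)]
    rfl

lemma filtered_keys_nodup (c : String) (d dA : PySem.Dict String (List Int))
    (hd : d.keys.Nodup) (hinv : dA.items = d.items.filter (fun p => p.1 != c)) :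
    dA.keys.Nodup := by
  have : dA.keys = (d.items.filter (fun p => p.1 != c)).map (fun p => p.1) := by
    simp only [PySem.Dict.keys, hinv]
  rw [this]
  have hsub : (d.items.filter (fun p => p.1 != c)).map (fun p => p.1)
      |>.Sublist (d.items.map (fun p => p.1)) :=
    List.Sublist.map _ List.filter_sublist
  exact List.Nodup.sublist hsub hd

lemma filtered_contains (c k : String) (hk : k ≠ c) (d dA : PySem.Dict String (List Int))
    (hinv : dA.items = d.items.filter (fun p => p.1 != c)) :
    dA.contains k = d.contains k := by
  rw [PySem.Dict.contains_eq_decide_mem_keys, PySem.Dict.contains_eq_decide_mem_keys]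
  simp only [PySem.Dict.keys, hinv]
  congr 1
  simp only [List.mem_map, List.mem_filter, eq_iff_iff]
  constructor
  · rintro ⟨p, ⟨hp, _⟩, rfl⟩; exact ⟨p, hp, rfl⟩
  · rintro ⟨p, hp, rfl⟩; exact ⟨p, ⟨hp, by simp [bne_iff_ne]; exact hk⟩, rfl⟩

lemma filtered_getD (c k : String) (hk : k ≠ c) (d dA : PySem.Dict String (List Int))
    (hd : d.keys.Nodup) (hinv : dA.items = d.items.filter (fun p => p.1 != c)) :
    dA.getD k [] = d.getD k [] := by
  have hA := filtered_keys_nodup c d dA hd hinv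
  by_cases hc : d.contains k = true
  · have hsome : (d.get? k).isSome := by rw [← PySem.Dict.contains_eq_isSome_get?]; exact hc
    obtain ⟨v0, hv0⟩ := Option.isSome_iff_exists.mp hsome
    have hmem : (k, v0) ∈ d.items := PySem.Dict.mem_items_of_get?_eq_some d hv0
    have hmemA : (k, v0) ∈ dA.items := by
      rw [hinv, List.mem_filter]
      exact ⟨hmem, by simp [bne_iff_ne]; exact hk⟩
    have hvA : dA.get? k = some v0 := PySem.Dict.get?_of_mem_items dA hmemA hA
    rw [PySem.Dict.getD_eq_get?_getD, PySem.Dict.getD_eq_get?_getD, hv0, hvA]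
  · have hcA : dA.contains k = false := by
      rw [filtered_contains c k hk d dA hinv]; exact Bool.not_eq_true _ |>.mp hc
    rw [PySem.Dict.getD_of_not_contains _ _ (Bool.not_eq_true _ |>.mp hc),
      PySem.Dict.getD_of_not_contains _ _ hcA]

-- one step of the two inner loops preserves the filter invariant
-- updating at key k does not change which pairs pass the "key ≠ c" filter
lemma filter_upd (c k : String) (w : List Int) (l : List (String × List Int)) :
    List.filter (fun p => p.1 != c) (l.map (fun p => if p.1 == k then (k, w) else p))
      = (List.filter (fun p => p.1 != c) l).map (fun p => if p.1 == k then (k, w) else p) := by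
  rw [List.filter_map]
  congr 1
  apply List.filter_congr
  intro p _
  by_cases h : p.1 = k
  · simp [h]
  · simp [h]

lemma step_items (c k : String) (v : Int) (d dA : PySem.Dict String (List Int))
    (hd : d.keys.Nodup) (hinv : dA.items = d.items.filter (fun p => p.1 != c)) :
    (if k != c then dA.modify k [] (· ++ [v]) else dA).items
      = (d.modify k [] (· ++ [v])).items.filter (fun p => p.1 != c) := by
  by_cases hk : k = c
  · subst hk
    rw [if_neg (by simp), PySem.Dict.modify, PySem.Dict.items_insert]
    by_cases hc : d.contains k = true
    · rw [if_pos hc, filter_upd, ← hinv]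
      symm
      conv_rhs => rw [← List.map_id dA.items]
      apply List.map_congr_left
      intro p hp
      rw [hinv, List.mem_filter] at hp
      have : p.1 ≠ k := by simpa [bne_iff_ne] using hp.2
      simp [this]
    · rw [if_neg hc, List.filter_append, ← hinv]
      simp
  · have hkc : (k != c) = true := by simp [bne_iff_ne]; exact hk
    rw [if_pos hkc, PySem.Dict.modify, PySem.Dict.modify,
      filtered_getD c k hk d dA hd hinv, PySem.Dict.items_insert, PySem.Dict.items_insert,
      filtered_contains c k hk d dA hinv]
    by_cases hc : d.contains k = true
    · rw [if_pos hc, if_pos hc, filter_upd, ← hinv]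
    · rw [if_neg hc, if_neg hc, List.filter_append, ← hinv]
      simp [bne_iff_ne, hk]

lemma fold_items (c : String) :
    ∀ (l : List (String × Int)) (d dA : PySem.Dict String (List Int)),
      d.keys.Nodup → dA.items = d.items.filter (fun p => p.1 != c) →
      (l.foldl (fun dgs q => if q.1 != c then dgs.modify q.1 [] (· ++ [q.2]) else dgs) dA).items
        = (l.foldl (fun dd q => dd.modify q.1 [] (· ++ [q.2])) d).items.filter (fun p => p.1 != c) := by
  intro l
  induction l with
  | nil => intro d dA _ hinv; simpa using hinv
  | cons q t ih =>
    intro d dA hd hinv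
    simp only [List.foldl_cons]
    have hstep := step_items c q.1 q.2 d dA hd hinv
    by_cases hq : (q.1 != c) = true
    · rw [if_pos hq] at hstep ⊢
      exact ih _ _ (by rw [PySem.Dict.modify]; exact PySem.Dict.nodup_keys_insert _ _ _ hd) hstep
    · rw [if_neg hq] at hstep ⊢
      exact ih _ _ (by rw [PySem.Dict.modify]; exact PySem.Dict.nodup_keys_insert _ _ _ hd) hstep

-- ---- the consensus string, column by column ----

lemma foldl_str_append_toList (f : Nat → String) :
    ∀ (l : List Nat) (s : String),
      (l.foldl (fun acc i => acc ++ f i) s).toList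
        = s.toList ++ l.flatMap (fun i => (f i).toList) := by
  intro l
  induction l with
  | nil => intro s; simp
  | cons i t ih => intro s; simp [ih, String.toList_append]

lemma flatMap_of_singleton (f : Nat → List Char) :
    ∀ (l : List Nat), (∀ x ∈ l, ∃ c, f x = [c]) →
      l.flatMap f = l.map (fun x => (f x).headD 'a') := by
  intro l
  induction l with
  | nil => intro _; rfl
  | cons i t ih =>
    intro H
    obtain ⟨c, hc⟩ := H i (by simp)
    simp only [List.flatMap_cons, List.map_cons, hc]
    rw [ih (fun x hx => H x (by simp [hx]))]
    rfl

lemma consensus_eq_foldl (data : List String) :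
    consensus data
      = (List.range ((data.headD "").toList.length)).foldl
          (fun cons i => cons ++ modeStr data i) "" := rfl

lemma modeStr_singleton (data : List String) (i : Nat) (hne : data ≠ [])
    (hlen : ∀ s ∈ data, (data.headD "").toList.length ≤ s.toList.length)
    (hi : i < (data.headD "").toList.length) :
    ∃ c, (modeStr data i).toList = [c] := by
  rw [modeStr_eq_max? data i hne]
  cases hm : PySem.List.max? (PySem.Set.ofList (colStrs data i))
      (fun k => (colStrs data i).count k) with
  | none =>
    rw [PySem.List.max?_eq_none_iff] at hm
    have : colStrs data i = [] := by
      cases hcol : colStrs data i with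
      | nil => rfl
      | cons a t => rw [hcol, PySem.Set.ofList_cons] at hm; simp at hm
    simp only [colStrs, List.map_eq_nil_iff] at this
    exact absurd this hne
  | some m =>
    have hmS : m ∈ PySem.Set.ofList (colStrs data i) := PySem.List.max?_mem hm
    have hmcol : m ∈ colStrs data i := (PySem.Set.mem_ofList _ _).mp hmS
    obtain ⟨s, hs, rfl⟩ := List.mem_map.mp hmcol
    have : i < s.toList.length := lt_of_lt_of_le hi (hlen s hs)
    obtain ⟨ch, hch⟩ : ∃ ch, s.toList[i]? = some ch := by
      exact ⟨s.toList[i], List.getElem?_eq_getElem this⟩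
    refine ⟨ch, ?_⟩
    simp [charAt1, hch]

lemma consensus_toList (data : List String) (hne : data ≠ [])
    (hlen : ∀ s ∈ data, (data.headD "").toList.length ≤ s.toList.length) :
    (consensus data).toList
      = (List.range ((data.headD "").toList.length)).map
          (fun i => (modeStr data i).toList.headD 'a') := by
  rw [consensus_eq_foldl, foldl_str_append_toList]
  rw [flatMap_of_singleton _ _ (fun i hi =>
    modeStr_singleton data i hne hlen (List.mem_range.mp hi))]
  rfl

lemma charAt1_consensus (data : List String) (i : Nat) (hne : data ≠ [])
    (hlen : ∀ s ∈ data, (data.headD "").toList.length ≤ s.toList.length)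
    (hi : i < (data.headD "").toList.length) :
    charAt1 (consensus data) i = modeStr data i := by
  obtain ⟨c, hc⟩ := modeStr_singleton data i hne hlen hi
  unfold charAt1
  rw [consensus_toList data hne hlen]
  rw [List.getElem?_map, List.getElem?_range hi]
  simp only [Option.map_some, hc, List.headD_cons]
  rw [← hc, String.ofList_toList]

-- ---- the two inner loops, related ----

lemma foldA_eq (c : String) (i : Nat) (l : List (Int × String))
    (d0 : PySem.Dict String (List Int)) :
    l.foldl (fun dgs p =>
        if charAt1 p.2 i != c then dgs.modify (charAt1 p.2 i) [] (· ++ [p.1]) else dgs) d0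
      = (l.map (fun p => (charAt1 p.2 i, p.1))).foldl
          (fun dgs q => if q.1 != c then dgs.modify q.1 [] (· ++ [q.2]) else dgs) d0 := by
  rw [List.foldl_map]

lemma disagrees_items (data : List String) (i : Nat) (c : String) :
    ((PySem.List.enumerate data).foldl (fun dgs p =>
        if charAt1 p.2 i != c then dgs.modify (charAt1 p.2 i) [] (· ++ [p.1]) else dgs)
      PySem.Dict.empty).items
      = (groupDict data i).items.filter (fun p => p.1 != c) := by
  rw [foldA_eq, groupDict_eq_std]
  exact fold_items c _ PySem.Dict.empty PySem.Dict.empty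
    (PySem.Dict.nodup_keys_empty) rfl

-- the common per-column consensus value
lemma mode_alt_eq (data : List String) (i : Nat) :
    (PySem.List.max? (groupDict data i).keys
        (fun k => ((groupDict data i).getD k []).length)).getD ""
      = (PySem.List.max? (PySem.Set.ofList (colStrs data i))
          (fun k => (colStrs data i).count k)).getD "" := by
  rw [groupDict_keys]
  rw [max?_key_congr _ (fun k => (colStrs data i).count k) _
    (fun k _ => groupDict_getD_len data i k)]

-- ===== VERDICT (by name: the statement is the Claim_ definition above) =====
theorem createInfo_spec : Claim_equal_createInfo := by
  intro data _ hpre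
  obtain ⟨hne, hlen⟩ := hpre
  unfold Spec_createInfo createInfo createInfo_alt
  rw [PySem.List.foldl_append_singleton_eq_map, PySem.List.foldl_append_singleton_eq_map]
  simp only [List.nil_append]
  have hn : (consensus data).toList.length = (data.headD "").toList.length := by
    rw [consensus_toList data hne hlen]; simp
  rw [hn]
  apply List.map_congr_left
  intro i hi
  have hi' := List.mem_range.mp hi
  rw [charAt1_consensus data i hne hlen hi']
  have hB : (List.foldl (fun d p => d.modify (charAt1 p.2 i) [] fun x => x ++ [p.1])
      PySem.Dict.empty (PySem.List.enumerate data)) = groupDict data i := rfl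
  rw [hB, mode_alt_eq data i, ← modeStr_eq_max? data i hne]
  simp only [contains_if_modify]
  rw [disagrees_items data i (modeStr data i)]
  rw [PySem.List.foldl_append_singleton_eq_map]
  simp
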